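-- pv_equiv track=rewrite | github.com/epeto/Master | Machine/Tareas/Tarea2/1/limpieza.py | col_interrogacion
-- ===== SOURCE A (Python) =====
-- def col_interrogacion(csvfile):
--     columnas_meta = []
--     for row in csvfile:
--         for i in range(len(row)):
--             if row[i] == '?':
--                 if not (i in columnas_meta):
--                     columnas_meta.append(i)
--     return columnas_meta
-- ===== SOURCE B (Python) =====
-- def col_interrogacion(csvfile):
--     # One pass: record for each column with a '?' the first row where it appears,
--     # then emit the columns sorted by (first_row, column) = the first-seen row-major order.
--     first = {}
--     for r, row in enumerate(csvfile):
--         for c, cell in enumerate(row):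
--             if cell == '?':
--                 first.setdefault(c, r)
--     return sorted(first, key=lambda c: (first[c], c))
-- ===== Notes on version B (the rewrite author's own statement) =====
-- stated objective: alternative
-- what changed: Replaces incremental dedup with a linear membership scan ('i in columnas_meta' inside the loop) by a single-pass dict of first-seen row per column (setdefault) followed by a sort on the key (first_row, column), which reproduces the row-major first-seen order.
import Mathlib
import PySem

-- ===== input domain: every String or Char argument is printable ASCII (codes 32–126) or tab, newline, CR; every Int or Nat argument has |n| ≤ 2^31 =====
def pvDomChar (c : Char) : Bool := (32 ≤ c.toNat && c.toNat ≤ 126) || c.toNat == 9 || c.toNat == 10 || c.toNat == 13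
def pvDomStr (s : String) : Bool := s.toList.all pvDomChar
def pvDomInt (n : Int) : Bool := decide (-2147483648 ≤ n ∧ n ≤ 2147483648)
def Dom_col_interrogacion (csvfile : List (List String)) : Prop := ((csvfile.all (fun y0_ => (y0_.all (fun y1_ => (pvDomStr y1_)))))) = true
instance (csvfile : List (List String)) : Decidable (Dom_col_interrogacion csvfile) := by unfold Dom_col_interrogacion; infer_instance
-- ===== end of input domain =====

-- B replaces A's incremental dedup-append (with its linear membership scan) by a
-- first-seen-row dict built in one pass plus a sort on the key (first_row, column);
-- alternative decomposition, same results.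

-- ===== PORT A =====
def col_interrogacion (csvfile : List (List String)) : List Int :=
  csvfile.foldl (fun columnas_meta row =>
    (PySem.List.pyRange 0 (PySem.List.len row) 1).foldl (fun columnas_meta i =>
      if PySem.List.pyGetD row i "" = "?" then
        if ¬ (i ∈ columnas_meta) then columnas_meta ++ [i] else columnas_meta
      else columnas_meta) columnas_meta) []

-- ===== PORT B =====
-- the dict first: column ↦ earliest row index where it holds '?'
def cibFirst (csvfile : List (List String)) : PySem.Dict Int Int :=
  (PySem.List.enumerate csvfile).foldl (fun first rc =>
    (PySem.List.enumerate rc.2).foldl (fun first cc =>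
      if cc.2 = "?" then first.setdefault cc.1 rc.1 else first) first) ⟨[]⟩

-- sorted(first, key=lambda c: (first[c], c)); first[c] is always present, so getD's default is never read
def col_interrogacion_alt (csvfile : List (List String)) : List Int :=
  let first := cibFirst csvfile
  PySem.List.sorted2 first.keys (fun c => first.getD c 0) (fun c => c)

-- ===== PRECONDITION & SPEC =====
def Spec_col_interrogacion (csvfile : List (List String)) (out : List Int) : Prop := out = col_interrogacion_alt csvfile
instance (csvfile : List (List String)) (out : List Int) : Decidable (Spec_col_interrogacion csvfile out) := by unfold Spec_col_interrogacion; infer_instance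

-- ===== CLAIM (what is proved, stated in full; the proofs are below) =====
def Claim_equal_col_interrogacion : Prop := ∀ (csvfile : List (List String)), Dom_col_interrogacion csvfile → Spec_col_interrogacion csvfile (col_interrogacion csvfile)

-- ===== LEMMAS AND PROOFS =====

-- (row, col) pairs of dict items, as (col, row), compared by row first then col
def pvLex (p q : Int × Int) : Prop := p.2 < q.2 ∨ (p.2 = q.2 ∧ p.1 < q.1)

lemma contains_iff_mem_keys (d : PySem.Dict Int Int) (k : Int) :
    d.contains k = true ↔ k ∈ d.keys := by
  simp [PySem.Dict.contains, PySem.Dict.keys, List.any_eq_true, List.mem_map]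

lemma A_inner_eq (row : List String) (acc : List Int) :
    (PySem.List.pyRange 0 (PySem.List.len row) 1).foldl (fun columnas_meta i =>
      if PySem.List.pyGetD row i "" = "?" then
        if ¬ (i ∈ columnas_meta) then columnas_meta ++ [i] else columnas_meta
      else columnas_meta) acc
    = (PySem.List.enumerate row).foldl (fun columnas_meta cc =>
      if cc.2 = "?" then
        if ¬ (cc.1 ∈ columnas_meta) then columnas_meta ++ [cc.1] else columnas_meta
      else columnas_meta) acc := by
  rw [PySem.List.enumerate_eq_map_pyRange row "", List.foldl_map]

lemma inner_invariant (r : Int) (row : List String) :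
    ∀ (s : Int) (d : PySem.Dict Int Int),
      d.keys.Nodup →
      d.items.Pairwise pvLex →
      (∀ p ∈ d.items, p.2 < r ∨ (p.2 = r ∧ p.1 < s)) →
      ((PySem.List.enumerate row s).foldl (fun columnas_meta cc =>
          if cc.2 = "?" then
            if ¬ (cc.1 ∈ columnas_meta) then columnas_meta ++ [cc.1] else columnas_meta
          else columnas_meta) d.keys
        = ((PySem.List.enumerate row s).foldl (fun first cc =>
            if cc.2 = "?" then first.setdefault cc.1 r else first) d).keys)
      ∧ ((PySem.List.enumerate row s).foldl (fun first cc =>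
            if cc.2 = "?" then first.setdefault cc.1 r else first) d).keys.Nodup
      ∧ ((PySem.List.enumerate row s).foldl (fun first cc =>
            if cc.2 = "?" then first.setdefault cc.1 r else first) d).items.Pairwise pvLex
      ∧ (∀ p ∈ ((PySem.List.enumerate row s).foldl (fun first cc =>
            if cc.2 = "?" then first.setdefault cc.1 r else first) d).items,
          p.2 < r ∨ (p.2 = r ∧ p.1 < s + row.length)) := by
  induction row with
  | nil =>
      intro s d hnd hpw hb
      simp only [PySem.List.enumerate_nil, List.foldl_nil, List.length_nil, Nat.cast_zero, add_zero]
      exact ⟨by trivial, hnd, hpw, hb⟩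
  | cons x xs ih =>
      intro s d hnd hpw hb
      rw [PySem.List.enumerate_cons]
      simp only [List.foldl_cons]
      by_cases hx : x = "?"
      · simp only [hx, if_true]
        by_cases hmem : s ∈ d.keys
        · have hc : d.contains s = true := (contains_iff_mem_keys d s).mpr hmem
          rw [PySem.Dict.setdefault_of_contains d r hc]
          simp only [hmem, not_true_eq_false, if_false]
          have hb' : ∀ p ∈ d.items, p.2 < r ∨ (p.2 = r ∧ p.1 < s + 1) := by
            intro p hp; rcases hb p hp with h | ⟨h1, h2⟩
            · exact Or.inl h
            · exact Or.inr ⟨h1, by omega⟩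
          obtain ⟨h1, h2, h3, h4⟩ := ih (s + 1) d hnd hpw hb'
          refine ⟨h1, h2, h3, ?_⟩
          intro p hp; rcases h4 p hp with h | ⟨ha, hbnd⟩
          · exact Or.inl h
          · exact Or.inr ⟨ha, by simp only [List.length_cons] at *; push_cast at *; omega⟩
        · have hc : d.contains s = false :=
            Bool.eq_false_iff.mpr (fun h => hmem ((contains_iff_mem_keys d s).mp h))
          rw [PySem.Dict.setdefault_of_not_contains d r hc]
          have hins : d.insert s r = ⟨d.items ++ [(s, r)]⟩ := by
            simp [PySem.Dict.insert, hc]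
          rw [hins]
          simp only [hmem, not_false_eq_true, if_true]
          have hkeys : (PySem.Dict.mk (d.items ++ [(s, r)]) : PySem.Dict Int Int).keys
              = d.keys ++ [s] := by
            simp [PySem.Dict.keys]
          have hnd' : (PySem.Dict.mk (d.items ++ [(s, r)]) : PySem.Dict Int Int).keys.Nodup := by
            rw [hkeys]
            simp only [List.nodup_append, List.nodup_singleton, true_and]
            refine ⟨hnd, ?_⟩
            intro a ha b hb'
            simp only [List.mem_singleton] at hb'
            subst hb'
            exact fun h => hmem (h ▸ ha)
          have hpw' : (PySem.Dict.mk (d.items ++ [(s, r)]) : PySem.Dict Int Int).items.Pairwise pvLex := by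
            simp only [List.pairwise_append]
            refine ⟨hpw, List.pairwise_singleton _ _, ?_⟩
            intro p hp q hq
            simp only [List.mem_singleton] at hq
            subst hq
            exact hb p hp
          have hb' : ∀ p ∈ (PySem.Dict.mk (d.items ++ [(s, r)]) : PySem.Dict Int Int).items,
              p.2 < r ∨ (p.2 = r ∧ p.1 < s + 1) := by
            intro p hp
            simp only [List.mem_append, List.mem_singleton] at hp
            rcases hp with hp | hp
            · rcases hb p hp with h | ⟨h1, h2⟩
              · exact Or.inl h
              · exact Or.inr ⟨h1, by omega⟩
            · subst hp; exact Or.inr ⟨rfl, by omega⟩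
          obtain ⟨h1, h2, h3, h4⟩ := ih (s + 1) ⟨d.items ++ [(s, r)]⟩ hnd' hpw' hb'
          rw [hkeys] at h1
          refine ⟨h1, h2, h3, ?_⟩
          intro p hp; rcases h4 p hp with h | ⟨ha, hbnd⟩
          · exact Or.inl h
          · exact Or.inr ⟨ha, by simp only [List.length_cons] at *; push_cast at *; omega⟩
      · simp only [hx, if_false]
        have hb' : ∀ p ∈ d.items, p.2 < r ∨ (p.2 = r ∧ p.1 < s + 1) := by
          intro p hp; rcases hb p hp with h | ⟨h1, h2⟩
          · exact Or.inl h
          · exact Or.inr ⟨h1, by omega⟩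
        obtain ⟨h1, h2, h3, h4⟩ := ih (s + 1) d hnd hpw hb'
        refine ⟨h1, h2, h3, ?_⟩
        intro p hp; rcases h4 p hp with h | ⟨ha, hbnd⟩
        · exact Or.inl h
        · exact Or.inr ⟨ha, by simp only [List.length_cons] at *; push_cast at *; omega⟩

lemma outer_invariant (csvfile : List (List String)) :
    ∀ (r : Int) (d : PySem.Dict Int Int),
      d.keys.Nodup →
      d.items.Pairwise pvLex →
      (∀ p ∈ d.items, p.2 < r) →
      (csvfile.foldl (fun columnas_meta row =>
          (PySem.List.enumerate row).foldl (fun columnas_meta cc =>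
            if cc.2 = "?" then
              if ¬ (cc.1 ∈ columnas_meta) then columnas_meta ++ [cc.1] else columnas_meta
            else columnas_meta) columnas_meta) d.keys
        = ((PySem.List.enumerate csvfile r).foldl (fun first rc =>
            (PySem.List.enumerate rc.2).foldl (fun first cc =>
              if cc.2 = "?" then first.setdefault cc.1 rc.1 else first) first) d).keys)
      ∧ ((PySem.List.enumerate csvfile r).foldl (fun first rc =>
            (PySem.List.enumerate rc.2).foldl (fun first cc =>
              if cc.2 = "?" then first.setdefault cc.1 rc.1 else first) first) d).keys.Nodup
      ∧ ((PySem.List.enumerate csvfile r).foldl (fun first rc =>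
            (PySem.List.enumerate rc.2).foldl (fun first cc =>
              if cc.2 = "?" then first.setdefault cc.1 rc.1 else first) first) d).items.Pairwise pvLex := by
  induction csvfile with
  | nil =>
      intro r d hnd hpw hb
      simp only [PySem.List.enumerate_nil, List.foldl_nil]
      exact ⟨by trivial, hnd, hpw⟩
  | cons row rows ih =>
      intro r d hnd hpw hb
      rw [PySem.List.enumerate_cons]
      simp only [List.foldl_cons]
      have hb0 : ∀ p ∈ d.items, p.2 < r ∨ (p.2 = r ∧ p.1 < (0 : Int)) := fun p hp => Or.inl (hb p hp)
      obtain ⟨h1, h2, h3, h4⟩ := inner_invariant r row 0 d hnd hpw hb0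
      have hb1 : ∀ p ∈ ((PySem.List.enumerate row 0).foldl (fun first cc =>
          if cc.2 = "?" then first.setdefault cc.1 r else first) d).items, p.2 < r + 1 := by
        intro p hp; rcases h4 p hp with h | ⟨ha, _⟩ <;> omega
      obtain ⟨g1, g2, g3⟩ := ih (r + 1) _ h2 h3 hb1
      exact ⟨by rw [h1]; exact g1, g2, g3⟩

lemma foldl_insertBy_acc {α : Type} (before : α → α → Bool) :
    ∀ (xs acc : List α),
      (∀ x ∈ xs, ∀ y ∈ acc, before x y = false) →
      xs.Pairwise (fun a b => before b a = false) →
      xs.foldl (fun acc x => PySem.List.insertBy before x acc) acc = acc ++ xs := by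
  intro xs
  induction xs with
  | nil => intro acc _ _; simp
  | cons x t ih =>
      intro acc hcross hpw
      simp only [List.foldl_cons]
      rw [PySem.List.insertBy_of_forall_not_before before x acc
        (fun y hy => hcross x (List.mem_cons_self) y hy)]
      rw [ih (acc ++ [x]) ?_ (List.Pairwise.of_cons hpw)]
      · simp
      · intro z hz y hy
        rcases List.mem_append.mp hy with hy | hy
        · exact hcross z (List.mem_cons_of_mem _ hz) y hy
        · rw [List.mem_singleton.mp hy]
          exact (List.pairwise_cons.mp hpw).1 z hz

lemma sorted2_eq_self {α : Type} (xs : List α) (k1 k2 : α → Int)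
    (h : xs.Pairwise (fun a b => k1 a < k1 b ∨ (k1 a = k1 b ∧ k2 a < k2 b))) :
    PySem.List.sorted2 xs k1 k2 = xs := by
  unfold PySem.List.sorted2
  simp only [Bool.false_eq_true, if_false]
  rw [foldl_insertBy_acc _ xs [] (by intro x _ y hy; simp at hy) ?_]
  · simp
  · refine h.imp ?_
    intro a b hab
    rcases hab with h1 | ⟨h1, h2⟩
    · simp only [Bool.or_eq_false_iff, Bool.and_eq_false_iff, decide_eq_false_iff_not,
        Bool.not_eq_false', decide_eq_true_eq]
      exact ⟨by omega, Or.inl (by omega)⟩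
    · simp only [Bool.or_eq_false_iff, Bool.and_eq_false_iff, decide_eq_false_iff_not,
        Bool.not_eq_false', decide_eq_true_eq]
      exact ⟨by omega, Or.inr (by omega)⟩

-- ===== VERDICT (by name: the statement is the Claim_ definition above) =====
theorem col_interrogacion_spec : Claim_equal_col_interrogacion := by
  intro csvfile _
  unfold Spec_col_interrogacion col_interrogacion col_interrogacion_alt cibFirst
  have hA : (fun (columnas_meta : List Int) (row : List String) =>
      (PySem.List.pyRange 0 (PySem.List.len row) 1).foldl (fun columnas_meta i =>
        if PySem.List.pyGetD row i "" = "?" then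
          if ¬ (i ∈ columnas_meta) then columnas_meta ++ [i] else columnas_meta
        else columnas_meta) columnas_meta)
      = (fun (columnas_meta : List Int) (row : List String) =>
      (PySem.List.enumerate row).foldl (fun columnas_meta cc =>
        if cc.2 = "?" then
          if ¬ (cc.1 ∈ columnas_meta) then columnas_meta ++ [cc.1] else columnas_meta
        else columnas_meta) columnas_meta) := by
    funext acc row; exact A_inner_eq row acc
  rw [hA]
  have h0 : (⟨[]⟩ : PySem.Dict Int Int).keys.Nodup := by simp [PySem.Dict.keys]
  have h0' : (⟨[]⟩ : PySem.Dict Int Int).items.Pairwise pvLex := by simp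
  have h0'' : ∀ p ∈ (⟨[]⟩ : PySem.Dict Int Int).items, p.2 < (0 : Int) := by simp
  obtain ⟨h1, h2, h3⟩ := outer_invariant csvfile 0 ⟨[]⟩ h0 h0' h0''
  have hkeys0 : (⟨[]⟩ : PySem.Dict Int Int).keys = ([] : List Int) := by simp [PySem.Dict.keys]
  rw [hkeys0] at h1
  set d := (PySem.List.enumerate csvfile 0).foldl (fun first rc =>
      (PySem.List.enumerate rc.2).foldl (fun first cc =>
        if cc.2 = "?" then first.setdefault cc.1 rc.1 else first) first) (⟨[]⟩ : PySem.Dict Int Int) with hd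
  rw [h1]
  symm
  apply sorted2_eq_self
  have hitems := PySem.Dict.items_eq_map_keys d h2 (0 : Int)
  rw [hitems, List.pairwise_map] at h3
  refine h3.imp ?_
  intro a b hab
  rcases hab with hlt | ⟨heq, hlt⟩
  · exact Or.inl hlt
  · exact Or.inr ⟨heq, hlt⟩
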